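-- pv_equiv track=rewrite | github.com/nx10/fcp-indi.github.io | docs/_sources/conf.py | _unireplace
-- ===== SOURCE A (Python) =====
-- def _unireplace(release_note, unireplace):
--     u = release_note.find('\\u')
--     if (u != -1):
--         e = release_note[u:u+6]
--         e2 = str(e[2:])
--         release_note = release_note.replace(
--             e,
--             f' |u{e2}| '
--         )
--         unireplace[e2] = e
--         return(_unireplace(release_note, unireplace))
--     return(
--         release_note,
--         '\n\n'.join([
--             f'.. |u{u}| unicode:: {v}\n   :trim:'
--             for u, v in list(unireplace.items())
--         ])
--     )
-- ===== SOURCE B (Python) =====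
-- # Iterative rewrite: a while-loop with an explicit hand-rolled single-pass
-- # replace-all scan instead of A's tail recursion + str.replace, and an explicit
-- # accumulator loop instead of the join-comprehension. Mutates `unireplace` in
-- # place exactly as A does.
-- def _replace_all(s, old, new):
--     out = []
--     i = 0
--     n = len(s)
--     m = len(old)
--     while i < n:
--         if s.startswith(old, i):
--             out.append(new)
--             i += m
--         else:
--             out.append(s[i])
--             i += 1
--     return ''.join(out)
--
--
-- def _unireplace(release_note, unireplace):
--     while True:
--         u = release_note.find('\\u')
--         if u == -1:
--             break
--         e = release_note[u:u+6]
--         e2 = e[2:]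
--         release_note = _replace_all(release_note, e, ' |u' + e2 + '| ')
--         unireplace[e2] = e
--     lines = []
--     for k, v in unireplace.items():
--         lines.append('.. |u' + k + '| unicode:: ' + v + '\n   :trim:')
--     return release_note, '\n\n'.join(lines)
-- ===== Notes on version B (the rewrite author's own statement) =====
-- stated objective: alternative
-- what changed: A's tail recursion with built-in str.replace and a join-comprehension becomes an explicit while-loop that replaces all occurrences with a hand-written single left-to-right scan (_replace_all) and builds the directive lines with an accumulator loop.
import Mathlib
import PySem

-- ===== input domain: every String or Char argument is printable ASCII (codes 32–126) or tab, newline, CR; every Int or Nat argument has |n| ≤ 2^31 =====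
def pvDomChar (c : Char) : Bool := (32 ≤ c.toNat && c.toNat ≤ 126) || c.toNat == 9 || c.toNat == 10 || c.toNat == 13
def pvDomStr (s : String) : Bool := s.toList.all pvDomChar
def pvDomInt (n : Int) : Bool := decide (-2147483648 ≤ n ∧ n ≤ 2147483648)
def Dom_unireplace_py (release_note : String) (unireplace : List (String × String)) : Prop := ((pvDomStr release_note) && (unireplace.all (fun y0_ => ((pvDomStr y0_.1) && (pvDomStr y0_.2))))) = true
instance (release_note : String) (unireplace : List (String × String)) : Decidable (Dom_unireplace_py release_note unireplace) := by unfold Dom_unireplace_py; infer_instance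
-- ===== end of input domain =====

-- B replaces A's tail recursion + built-in str.replace by a while-loop with a
-- hand-rolled single-pass replace-all scan and an explicit accumulator loop for
-- the directive lines (same return value; both mutate the dict argument the same way).

-- ===== PORT A =====
-- the literal '\u' searched for (backslash + 'u')
def uniBU : List Char := ['\\', 'u']

-- A's recursion. Python's recursion terminates because every call strictly
-- decreases the number of '\u' occurrences (each replaced occurrence of e loses
-- the leading '\u' and the replacement ' |u…| ' creates none at its borders),
-- and that number is at most len(release_note); the fuel len+1 is a totality
-- guard only, never exhausted on the inputs the recursion is run on.
def uniRecA : Nat → List Char → PySem.Dict (List Char) (List Char) →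
    List Char × PySem.Dict (List Char) (List Char)
  | 0, s, d => (s, d)
  | fuel+1, s, d =>
    let u := PySem.Chars.find s uniBU
    if u ≠ -1 then
      let e := PySem.List.slice s (some u) (some (u + 6))
      let e2 := PySem.List.slice e (some 2) none
      uniRecA fuel (PySem.Chars.replace s e (" |u".toList ++ e2 ++ "| ".toList)) (d.insert e2 e)
    else
      (s, d)

def unireplace_py (release_note : String) (unireplace : List (String × String)) : String × String :=
  let r := uniRecA (release_note.toList.length + 1) release_note.toList
    (PySem.Dict.ofList (unireplace.map (fun kv => (kv.1.toList, kv.2.toList))))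
  (String.ofList r.1,
   String.ofList (PySem.Chars.join ("\n\n".toList)
     (r.2.items.map (fun kv =>
       ".. |u".toList ++ kv.1 ++ "| unicode:: ".toList ++ kv.2 ++ "\n   :trim:".toList))))

-- ===== PORT B =====
-- Source B's _replace_all: one left-to-right scan; at each position either the whole
-- pattern is consumed and `new` emitted, or one character is copied. The
-- conjunct `old ≠ []` only guards termination (old is never [] at call sites,
-- Python never tests it).
def uniReplAll (old new : List Char) (l : List Char) : List Char :=
  match l with
  | [] => []
  | c :: t =>
    if h : old.isPrefixOf (c :: t) = true ∧ old ≠ [] then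
      new ++ uniReplAll old new ((c :: t).drop old.length)
    else
      c :: uniReplAll old new t
termination_by l.length
decreasing_by
  · have : 1 ≤ old.length := by
      cases old with
      | nil => exact absurd rfl h.2
      | cons o os => simp
    simp [List.length_drop]
    omega
  · simp

-- one iteration of Source B's `while True:` body; `none` = the `break`
def uniStepB (s : List Char) (d : PySem.Dict (List Char) (List Char)) :
    Option (List Char × PySem.Dict (List Char) (List Char)) :=
  let u := PySem.Chars.find s uniBU
  if u = -1 then none
  else
    let e := PySem.List.slice s (some u) (some (u + 6))
    let e2 := PySem.List.slice e (some 2) none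
    some (uniReplAll e (" |u".toList ++ e2 ++ "| ".toList) s, d.insert e2 e)

-- the while loop (same totality-guard fuel as A's port; see comment there)
def uniWhileB : Nat → List Char → PySem.Dict (List Char) (List Char) →
    List Char × PySem.Dict (List Char) (List Char)
  | 0, s, d => (s, d)
  | fuel+1, s, d =>
    match uniStepB s d with
    | none => (s, d)
    | some sd => uniWhileB fuel sd.1 sd.2

def unireplace_py_alt (release_note : String) (unireplace : List (String × String)) : String × String :=
  let r := uniWhileB (release_note.toList.length + 1) release_note.toList
    (PySem.Dict.ofList (unireplace.map (fun kv => (kv.1.toList, kv.2.toList))))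
  let lines := r.2.items.foldl (fun acc kv =>
    acc ++ [".. |u".toList ++ kv.1 ++ "| unicode:: ".toList ++ kv.2 ++ "\n   :trim:".toList]) []
  (String.ofList r.1, String.ofList (PySem.Chars.join ("\n\n".toList) lines))

-- ===== PRECONDITION & SPEC =====
def Spec_unireplace_py (release_note : String) (unireplace : List (String × String)) (out : String × String) : Prop := out = unireplace_py_alt release_note unireplace
instance (release_note : String) (unireplace : List (String × String)) (out : String × String) : Decidable (Spec_unireplace_py release_note unireplace out) := by unfold Spec_unireplace_py; infer_instance

-- ===== CLAIM (what is proved, stated in full; the proofs are below) =====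
def Claim_equal_unireplace_py : Prop := ∀ (release_note : String) (unireplace : List (String × String)), Dom_unireplace_py release_note unireplace → Spec_unireplace_py release_note unireplace (unireplace_py release_note unireplace)

-- ===== LEMMAS AND PROOFS =====

-- B's scan computes exactly Python's str.replace for a nonempty pattern
theorem uniReplAll_go (old new : List Char) (hold : old ≠ []) :
    ∀ (fuel : Nat) (l acc : List Char), l.length ≤ fuel →
      PySem.Chars.replace.go old new fuel l acc = acc.reverse ++ uniReplAll old new l := by
  intro fuel
  induction fuel with
  | zero =>
    intro l acc hl
    have : l = [] := List.eq_nil_of_length_eq_zero (by omega)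
    subst this
    simp [PySem.Chars.replace.go, uniReplAll]
  | succ n ih =>
    intro l acc hl
    cases l with
    | nil => simp [PySem.Chars.replace.go, uniReplAll]
    | cons c t =>
      rw [PySem.Chars.replace.go]
      by_cases hp : old.isPrefixOf (c :: t) = true
      · have h1 : 1 ≤ old.length := by
          cases old with
          | nil => exact absurd rfl hold
          | cons o os => simp
        rw [if_pos hp, ih _ _ (by simp only [List.length_drop, List.length_cons] at hl ⊢; omega)]
        rw [uniReplAll, dif_pos ⟨hp, hold⟩]
        simp
      · rw [if_neg hp, ih _ _ (by simp at hl ⊢; omega)]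
        rw [uniReplAll, dif_neg (by simp [hp])]
        simp

theorem uniReplAll_eq_replace (s old new : List Char) (hold : old ≠ []) :
    PySem.Chars.replace s old new = uniReplAll old new s := by
  rw [PySem.Chars.replace, if_neg (by simp [hold])]
  simpa using uniReplAll_go old new hold s.length s [] le_rfl

-- the slice release_note[u:u+6] is nonempty when find succeeded
theorem uniSlice_ne_nil (s : List Char) (h : PySem.Chars.find s uniBU ≠ -1) :
    PySem.List.slice s (some (PySem.Chars.find s uniBU))
      (some (PySem.Chars.find s uniBU + 6)) ≠ [] := by
  have h0 : 0 ≤ PySem.Chars.find s uniBU := by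
    have := PySem.Chars.neg_one_le_find s uniBU
    omega
  obtain ⟨hpre, -⟩ := PySem.Chars.find_spec (s := s) (sub := uniBU) h0
  have hd : s.drop (PySem.Chars.find s uniBU).toNat ≠ [] := by
    intro hnil
    rw [hnil] at hpre
    exact (by decide : uniBU ≠ []) (List.prefix_nil.mp hpre)
  rw [PySem.List.slice_toNat _ h0 (by omega)]
  have h6 : (PySem.Chars.find s uniBU + 6).toNat - (PySem.Chars.find s uniBU).toNat = 6 := by
    omega
  rw [h6]
  simp [List.take_eq_nil_iff, hd]

-- the two loops compute the same state, fuel by fuel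
theorem uniLoop_eq : ∀ (fuel : Nat) (s : List Char) (d : PySem.Dict (List Char) (List Char)),
    uniRecA fuel s d = uniWhileB fuel s d := by
  intro fuel
  induction fuel with
  | zero => intro s d; rfl
  | succ n ih =>
    intro s d
    rw [uniRecA, uniWhileB]
    unfold uniStepB
    by_cases h : PySem.Chars.find s uniBU = -1
    · simp [h]
    · simp only [h, ne_eq, not_false_eq_true, if_pos]
      rw [uniReplAll_eq_replace _ _ _ (uniSlice_ne_nil s h)]
      exact ih _ _

-- ===== VERDICT (by name: the statement is the Claim_ definition above) =====
theorem unireplace_py_spec : Claim_equal_unireplace_py := by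
  intro release_note unireplace _
  unfold Spec_unireplace_py unireplace_py unireplace_py_alt
  rw [uniLoop_eq]
  simp only [PySem.List.foldl_append_singleton_eq_map, List.nil_append]
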